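-- pv_equiv track=rewrite | github.com/tarunsingh-eng/python-sql-portfolio | python/problem_solving/hacker_rank/Python/GreaterThanAvg.py | countResponseTimeRegressions
-- ===== SOURCE A (Python) =====
-- def countResponseTimeRegressions(responseTimes):
--     # Write your code here
--     if len(responseTimes) == 0:
--         return 0
--     count = 0
--     # avg = 0
--     running_sum = responseTimes[0]
--     for i in range (1, len(responseTimes)):
--         # avg = running_sum / i
--
--         if responseTimes[i] * i > running_sum:
--             count +=1
--
--         running_sum += responseTimes[i]
--
--     return count
-- ===== SOURCE B (Python) =====
-- def countResponseTimeRegressions(responseTimes):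
--     # Divide and conquer: solve(seg, i0, s0) counts regressions inside seg,
--     # whose first element has global index i0 and where s0 is the sum of all
--     # elements before seg; it returns (count, sum(seg)).
--     def solve(seg, i0, s0):
--         if not seg:
--             return (0, 0)
--         if len(seg) == 1:
--             x = seg[0]
--             return ((1 if i0 > 0 and x * i0 > s0 else 0), x)
--         m = len(seg) // 2
--         cl, sl = solve(seg[:m], i0, s0)
--         cr, sr = solve(seg[m:], i0 + m, s0 + sl)
--         return (cl + cr, sl + sr)
--     return solve(responseTimes, 0, 0)[0]
-- ===== Notes on version B (the rewrite author's own statement) =====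
-- stated objective: alternative
-- what changed: Replaced A's single left-to-right running-sum loop by a recursive divide-and-conquer: the list is split in halves, each half is solved recursively with the global index offset and the sum of everything to its left, and each call returns (count, segment sum).
import Mathlib
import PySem

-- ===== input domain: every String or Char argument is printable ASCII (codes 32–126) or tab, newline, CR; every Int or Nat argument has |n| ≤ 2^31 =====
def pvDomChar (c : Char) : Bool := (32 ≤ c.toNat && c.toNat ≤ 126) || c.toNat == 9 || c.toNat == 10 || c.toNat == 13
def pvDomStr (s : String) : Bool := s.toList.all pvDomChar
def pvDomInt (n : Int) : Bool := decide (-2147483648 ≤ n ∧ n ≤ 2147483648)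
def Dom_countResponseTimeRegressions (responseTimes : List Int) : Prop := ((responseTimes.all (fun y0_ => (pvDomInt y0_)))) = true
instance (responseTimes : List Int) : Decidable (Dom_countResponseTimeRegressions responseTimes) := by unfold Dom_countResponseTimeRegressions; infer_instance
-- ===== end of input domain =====

-- B replaces A's single running-sum loop by a divide-and-conquer that splits the list in halves
-- and returns (count, segment sum) from each recursive call (alternative decomposition).

-- ===== PORT A =====
def countResponseTimeRegressions (responseTimes : List Int) : Int :=
  if responseTimes.length = 0 then 0
  else
    ((PySem.List.pyRange 1 (responseTimes.length : Int) 1).foldl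
      (fun (st : Int × Int) i =>
        ((if PySem.List.pyGetD responseTimes i 0 * i > st.2 then st.1 + 1 else st.1),
         st.2 + PySem.List.pyGetD responseTimes i 0))
      (0, PySem.List.pyGetD responseTimes 0 0)).1

-- ===== PORT B =====
-- solve(seg, i0, s0): seg's first element has global index i0, s0 = sum of everything before seg;
-- returns (count inside seg, sum(seg)).  seg[:m] / seg[m:] ported as take/drop (m = len//2 is in range).
def pvSolve : List Int → Int → Int → Int × Int
  | [], _, _ => (0, 0)
  | [x], i0, s0 => ((if i0 > 0 ∧ x * i0 > s0 then 1 else 0), x)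
  | x :: y :: t, i0, s0 =>
      let seg := x :: y :: t
      let m := seg.length / 2
      let l := pvSolve (seg.take m) i0 s0
      let r := pvSolve (seg.drop m) (i0 + m) (s0 + l.2)
      (l.1 + r.1, l.2 + r.2)
termination_by seg _ _ => seg.length
decreasing_by
  · simp only [List.length_take, List.length_cons]; omega
  · simp only [List.length_drop, List.length_cons]; omega

def countResponseTimeRegressions_alt (responseTimes : List Int) : Int :=
  (pvSolve responseTimes 0 0).1

-- ===== PRECONDITION & SPEC =====
def Spec_countResponseTimeRegressions (responseTimes : List Int) (out : Int) : Prop := out = countResponseTimeRegressions_alt responseTimes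
instance (responseTimes : List Int) (out : Int) : Decidable (Spec_countResponseTimeRegressions responseTimes out) := by unfold Spec_countResponseTimeRegressions; infer_instance

-- ===== CLAIM (what is proved, stated in full; the proofs are below) =====
def Claim_equal_countResponseTimeRegressions : Prop := ∀ (responseTimes : List Int), Dom_countResponseTimeRegressions responseTimes → Spec_countResponseTimeRegressions responseTimes (countResponseTimeRegressions responseTimes)

-- ===== LEMMAS AND PROOFS =====

/-- Reference count: walk the remaining list with global index `i0` and prior-sum `s0`. -/
def pvAux : List Int → Int → Int → Int
  | [], _, _ => 0
  | x :: t, i0, s0 => (if i0 > 0 ∧ x * i0 > s0 then 1 else 0) + pvAux t (i0 + 1) (s0 + x)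

theorem pvAux_append (u v : List Int) (i0 s0 : Int) :
    pvAux (u ++ v) i0 s0 = pvAux u i0 s0 + pvAux v (i0 + u.length) (s0 + u.sum) := by
  induction u generalizing i0 s0 with
  | nil => simp [pvAux]
  | cons x t ih =>
    simp only [List.cons_append, pvAux, ih, List.length_cons, List.sum_cons]
    push_cast
    ring_nf

theorem pvSolve_eq (seg : List Int) (i0 s0 : Int) :
    pvSolve seg i0 s0 = (pvAux seg i0 s0, seg.sum) := by
  fun_induction pvSolve seg i0 s0 with
  | case1 => simp [pvAux]
  | case2 x i0 s0 => simp [pvAux]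
  | case3 a b t i0 s0 seg m l r ih1 ih2 ih3 =>
    have hm : ((a :: b :: t).take ((a :: b :: t).length / 2)).length
        = (a :: b :: t).length / 2 := by
      simp only [List.length_take, List.length_cons]; omega
    have hsplit :=
      (List.take_append_drop ((a :: b :: t).length / 2) (a :: b :: t)).symm
    simp only [l, r, seg, m] at ih3 ⊢
    simp only [seg, m] at ih1
    rw [ih1] at ih3 ⊢
    simp only at ih3
    rw [ih3]
    conv_rhs => rw [hsplit]
    rw [pvAux_append, List.sum_append, hm]

theorem pvLoopA (k : Nat) (xs : List Int) (a : Nat) (c : Int)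
    (hk : a + k = xs.length) (ha : 1 ≤ a) :
    (PySem.List.pyRange (a : Int) (xs.length : Int) 1).foldl
      (fun (st : Int × Int) i =>
        ((if PySem.List.pyGetD xs i 0 * i > st.2 then st.1 + 1 else st.1),
         st.2 + PySem.List.pyGetD xs i 0))
      (c, (xs.take a).sum)
      = (c + pvAux (xs.drop a) a ((xs.take a).sum), xs.sum) := by
  induction k generalizing a c with
  | zero =>
    have hx : a = xs.length := by omega
    subst hx
    simp [PySem.List.pyRange_one_eq_nil, pvAux]
  | succ k ih =>
    have hlt : a < xs.length := by omega
    rw [PySem.List.pyRange_one_cons (by exact_mod_cast hlt)]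
    have hget : PySem.List.pyGetD xs (a : Int) 0 = xs[a] := by
      rw [PySem.List.pyGetD_natCast, List.getD_eq_getElem xs 0 hlt]
    have hdrop : xs.drop a = xs[a] :: xs.drop (a + 1) := List.drop_eq_getElem_cons hlt
    have htake : (xs.take (a + 1)).sum = (xs.take a).sum + xs[a] :=
      List.sum_take_succ xs a hlt
    simp only [List.foldl_cons, hget]
    have eif : (if xs[a] * (a : Int) > (xs.take a).sum then c + 1 else c)
        = c + if xs[a] * (a : Int) > (xs.take a).sum then 1 else 0 := by
      split_ifs <;> ring
    have := ih (a + 1) (c + if xs[a] * (a : Int) > (xs.take a).sum then 1 else 0)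
      (by omega) (by omega)
    push_cast at this ⊢
    rw [htake] at this
    rw [eif, this, hdrop]
    have hguard : ((0 : Int) < (a : Int) ∧ (xs.take a).sum < xs[a] * (a : Int))
        ↔ ((xs.take a).sum < xs[a] * (a : Int)) := by
      constructor
      · exact fun h => h.2
      · exact fun h => ⟨by exact_mod_cast Nat.lt_of_lt_of_le Nat.zero_lt_one ha, h⟩
    simp only [pvAux, gt_iff_lt, hguard, Prod.mk.injEq]
    exact ⟨by ring, trivial⟩

-- ===== VERDICT (by name: the statement is the Claim_ definition above) =====
theorem countResponseTimeRegressions_spec : Claim_equal_countResponseTimeRegressions := by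
  intro xs _
  unfold Spec_countResponseTimeRegressions countResponseTimeRegressions countResponseTimeRegressions_alt
  rw [pvSolve_eq]
  cases xs with
  | nil => simp [pvAux]
  | cons x t =>
    simp only [List.length_cons, if_neg (Nat.succ_ne_zero t.length)]
    have h1 : PySem.List.pyGetD (x :: t) (0 : Int) 0 = ((x :: t).take 1).sum := by
      simp [PySem.List.pyGetD_zero_cons]
    rw [h1]
    have hA := pvLoopA t.length (x :: t) 1 0 (by simp only [List.length_cons]; omega) (le_refl 1)
    simp only [List.length_cons] at hA ⊢
    push_cast at hA ⊢
    rw [hA]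
    simp [pvAux]
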